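-- pv_equiv track=rewrite | github.com/noivan0/universal-agent-team | tests/test_performance_complete.py | _calculate_state_patch
-- ===== SOURCE A (Python) =====
-- from typing import Dict, List, Any, Optional, Tuple
--
-- def _calculate_state_patch(old_state: Dict, new_state: Dict) -> Dict:
--     """Calculate differences between states."""
--     patch = {"added": {}, "modified": {}, "deleted": {}}
--
--     # Find added/modified keys
--     for key, value in new_state.items():
--         if key not in old_state:
--             patch["added"][key] = value
--         elif old_state[key] != value:
--             patch["modified"][key] = value
--
--     # Find deleted keys
--     for key in old_state:
--         if key not in new_state:
--             patch["deleted"][key] = old_state[key]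
--
--     return patch
-- ===== SOURCE B (Python) =====
-- def _calculate_state_patch(old_state, new_state):
--     """Calculate differences between states."""
--     remaining = dict(old_state)
--     added = {}
--     modified = {}
--     _MISSING = object()
--     for key, value in new_state.items():
--         old = remaining.pop(key, _MISSING)
--         if old is _MISSING:
--             added[key] = value
--         elif old != value:
--             modified[key] = value
--     return {"added": added, "modified": modified, "deleted": remaining}
-- ===== Notes on version B (the rewrite author's own statement) =====
-- stated objective: alternative
-- what changed: A makes two passes with explicit membership tests (new_state vs old_state, then old_state vs new_state); B makes one pass over new_state that pops each key from a mutable copy of old_state, classifying by the pop result, and the unpopped residue of the copy is returned directly as the deleted dict, so no membership test against new_state and no second classification pass exists.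
import Mathlib
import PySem

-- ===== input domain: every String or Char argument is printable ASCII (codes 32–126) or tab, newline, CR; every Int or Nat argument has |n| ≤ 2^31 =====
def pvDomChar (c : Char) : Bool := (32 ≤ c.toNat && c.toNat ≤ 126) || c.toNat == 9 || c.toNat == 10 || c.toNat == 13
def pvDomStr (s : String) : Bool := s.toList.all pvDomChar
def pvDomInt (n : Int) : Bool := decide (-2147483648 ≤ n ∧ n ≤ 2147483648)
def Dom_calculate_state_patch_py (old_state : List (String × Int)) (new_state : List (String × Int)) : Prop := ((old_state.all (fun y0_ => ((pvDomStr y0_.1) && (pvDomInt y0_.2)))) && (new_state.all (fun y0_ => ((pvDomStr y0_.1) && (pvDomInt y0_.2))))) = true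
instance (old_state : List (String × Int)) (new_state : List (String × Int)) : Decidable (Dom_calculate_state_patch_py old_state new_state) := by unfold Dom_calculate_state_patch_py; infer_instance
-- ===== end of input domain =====

-- B replaces A's two membership-testing passes by one pass that pops each new key from a
-- mutable copy of old_state and returns the unpopped residue as the deleted dict
-- (objective: alternative decomposition, same asymptotic cost). Return value only; no mutation.

-- ===== PORT A =====
-- step of A's first loop: 'for key, value in new_state.items(): …'
def pvStepNew (oldD : PySem.Dict String Int)
    (p : PySem.Dict String (PySem.Dict String Int)) (kv : String × Int) :
    PySem.Dict String (PySem.Dict String Int) :=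
  if oldD.contains kv.1 = false then
    p.modify "added" PySem.Dict.empty (fun d => d.insert kv.1 kv.2)
  -- 'old_state[key] != value': getD is exact here, the elif guarantees the key is present
  else if oldD.getD kv.1 0 ≠ kv.2 then
    p.modify "modified" PySem.Dict.empty (fun d => d.insert kv.1 kv.2)
  else p

-- step of A's second loop: 'for key in old_state: …'
def pvStepOld (oldD newD : PySem.Dict String Int)
    (p : PySem.Dict String (PySem.Dict String Int)) (k : String) :
    PySem.Dict String (PySem.Dict String Int) :=
  if newD.contains k = false then
    p.modify "deleted" PySem.Dict.empty (fun d => d.insert k (oldD.getD k 0))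
  else p

def calculate_state_patch_py (old_state : List (String × Int)) (new_state : List (String × Int)) : List (String × List (String × Int)) :=
  let oldD : PySem.Dict String Int := PySem.Dict.mk old_state
  let newD : PySem.Dict String Int := PySem.Dict.mk new_state
  let patch : PySem.Dict String (PySem.Dict String Int) :=
    PySem.Dict.ofList [("added", PySem.Dict.empty), ("modified", PySem.Dict.empty), ("deleted", PySem.Dict.empty)]
  let patch := newD.items.foldl (pvStepNew oldD) patch
  let patch := (PySem.Dict.keys oldD).foldl (pvStepOld oldD newD) patch
  patch.items.map (fun q => (q.1, q.2.items))

-- ===== PORT B =====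
-- Source B's loop body: 'old = remaining.pop(key, _MISSING)' = get? then erase; classify by the result
def pvStepB (s : PySem.Dict String Int × PySem.Dict String Int × PySem.Dict String Int)
    (kv : String × Int) :
    PySem.Dict String Int × PySem.Dict String Int × PySem.Dict String Int :=
  match s.1.get? kv.1 with
  | none => (s.1, s.2.1.insert kv.1 kv.2, s.2.2)
  | some old =>
    if old ≠ kv.2 then (s.1.erase kv.1, s.2.1, s.2.2.insert kv.1 kv.2)
    else (s.1.erase kv.1, s.2.1, s.2.2)

def calculate_state_patch_py_alt (old_state : List (String × Int)) (new_state : List (String × Int)) : List (String × List (String × Int)) :=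
  let r := new_state.foldl pvStepB
    (PySem.Dict.mk old_state, (PySem.Dict.empty : PySem.Dict String Int), (PySem.Dict.empty : PySem.Dict String Int))
  [("added", r.2.1.items), ("modified", r.2.2.items), ("deleted", r.1.items)]

-- ===== PRECONDITION & SPEC =====
-- Pre_ excludes association lists with duplicate keys: such a list is not a Python dict (the
-- callers' inputs are dicts, whose keys are unique), and the list-level behaviour there is
-- accidental, so nothing is claimed about it.
def Pre_calculate_state_patch_py (old_state : List (String × Int)) (new_state : List (String × Int)) : Prop :=
  (old_state.map Prod.fst).Nodup ∧ (new_state.map Prod.fst).Nodup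
instance (old_state : List (String × Int)) (new_state : List (String × Int)) : Decidable (Pre_calculate_state_patch_py old_state new_state) := by unfold Pre_calculate_state_patch_py; infer_instance

def pvWitness_calculate_state_patch_py : (List (String × Int)) × (List (String × Int)) :=
  ([("a", 1), ("b", 2)], [("b", 3), ("c", 4)])

def Spec_calculate_state_patch_py (old_state : List (String × Int)) (new_state : List (String × Int)) (out : List (String × List (String × Int))) : Prop := out = calculate_state_patch_py_alt old_state new_state
instance (old_state : List (String × Int)) (new_state : List (String × Int)) (out : List (String × List (String × Int))) : Decidable (Spec_calculate_state_patch_py old_state new_state out) := by unfold Spec_calculate_state_patch_py; infer_instance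

-- ===== CLAIM (what is proved, stated in full; the proofs are below) =====
def Claim_equal_calculate_state_patch_py : Prop := ∀ (old_state : List (String × Int)) (new_state : List (String × Int)), Dom_calculate_state_patch_py old_state new_state → Pre_calculate_state_patch_py old_state new_state → Spec_calculate_state_patch_py old_state new_state (calculate_state_patch_py old_state new_state)

-- ===== LEMMAS AND PROOFS =====

-- the shape of A's patch dict throughout: three fixed keys
def pvMk3 (a m d : PySem.Dict String Int) : PySem.Dict String (PySem.Dict String Int) :=
  PySem.Dict.mk [("added", a), ("modified", m), ("deleted", d)]

theorem pvMk3_modify_added (a m d : PySem.Dict String Int) (f : PySem.Dict String Int → PySem.Dict String Int) :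
    (pvMk3 a m d).modify "added" PySem.Dict.empty f = pvMk3 (f a) m d := rfl

theorem pvMk3_modify_modified (a m d : PySem.Dict String Int) (f : PySem.Dict String Int → PySem.Dict String Int) :
    (pvMk3 a m d).modify "modified" PySem.Dict.empty f = pvMk3 a (f m) d := rfl

theorem pvMk3_modify_deleted (a m d : PySem.Dict String Int) (f : PySem.Dict String Int → PySem.Dict String Int) :
    (pvMk3 a m d).modify "deleted" PySem.Dict.empty f = pvMk3 a m (f d) := rfl

theorem pvFoldNew (oldD : PySem.Dict String Int) (l : List (String × Int)) :
    ∀ (a m d : PySem.Dict String Int),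
    (l.map Prod.fst).Nodup →
    (∀ p ∈ l, a.contains p.1 = false) →
    (∀ p ∈ l, m.contains p.1 = false) →
    l.foldl (pvStepNew oldD) (pvMk3 a m d) =
      pvMk3 (PySem.Dict.mk (a.items ++ l.filter (fun p => !(oldD.contains p.1))))
            (PySem.Dict.mk (m.items ++ l.filter (fun p => oldD.contains p.1 && oldD.getD p.1 0 != p.2)))
            d := by
  induction l with
  | nil => intro a m d _ _ _; simp
  | cons h t ih =>
    intro a m d hnd ha hm
    simp only [List.map_cons, List.nodup_cons, List.mem_map] at hnd
    obtain ⟨hnh, hndt⟩ := hnd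
    have hane : ∀ p ∈ t, p.1 ≠ h.1 := by
      intro p hp he; exact hnh ⟨p, hp, he⟩
    simp only [List.foldl_cons]
    by_cases hc : oldD.contains h.1 = false
    · have hstep : pvStepNew oldD (pvMk3 a m d) h = pvMk3 (a.insert h.1 h.2) m d := by
        simp [pvStepNew, hc, pvMk3_modify_added]
      rw [hstep, ih (a.insert h.1 h.2) m d hndt
        (by intro p hp
            rw [PySem.Dict.contains_insert]
            simp [hane p hp, ha p (List.mem_cons_of_mem _ hp)])
        (fun p hp => hm p (List.mem_cons_of_mem _ hp))]
      rw [PySem.Dict.items_insert_of_not_contains _ _ (ha h (List.mem_cons_self))]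
      simp [hc, List.append_assoc]
    · have hc' : oldD.contains h.1 = true := by revert hc; cases oldD.contains h.1 <;> simp
      by_cases hv : oldD.getD h.1 0 ≠ h.2
      · have hstep : pvStepNew oldD (pvMk3 a m d) h = pvMk3 a (m.insert h.1 h.2) d := by
          simp [pvStepNew, hc', hv, pvMk3_modify_modified]
        rw [hstep, ih a (m.insert h.1 h.2) d hndt
          (fun p hp => ha p (List.mem_cons_of_mem _ hp))
          (by intro p hp
              rw [PySem.Dict.contains_insert]
              simp [hane p hp, hm p (List.mem_cons_of_mem _ hp)])]
        rw [PySem.Dict.items_insert_of_not_contains _ _ (hm h (List.mem_cons_self))]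
        simp [hc', hv, List.append_assoc, bne]
      · have hstep : pvStepNew oldD (pvMk3 a m d) h = pvMk3 a m d := by
          simp [pvStepNew, hc', hv]
        rw [hstep, ih a m d hndt
          (fun p hp => ha p (List.mem_cons_of_mem _ hp))
          (fun p hp => hm p (List.mem_cons_of_mem _ hp))]
        rw [not_ne_iff] at hv
        simp [hc', hv, bne]

theorem pvFoldOld (oldD newD : PySem.Dict String Int) (l : List (String × Int)) :
    ∀ (a m d : PySem.Dict String Int),
    (l.map Prod.fst).Nodup →
    (∀ p ∈ l, d.contains p.1 = false) →
    (∀ p ∈ l, oldD.getD p.1 0 = p.2) →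
    l.foldl (fun s p => pvStepOld oldD newD s p.1) (pvMk3 a m d) =
      pvMk3 a m (PySem.Dict.mk (d.items ++ l.filter (fun p => !(newD.contains p.1)))) := by
  induction l with
  | nil => intro a m d _ _ _; simp
  | cons h t ih =>
    intro a m d hnd hd hv
    simp only [List.map_cons, List.nodup_cons, List.mem_map] at hnd
    obtain ⟨hnh, hndt⟩ := hnd
    have hane : ∀ p ∈ t, p.1 ≠ h.1 := fun p hp he => hnh ⟨p, hp, he⟩
    simp only [List.foldl_cons]
    by_cases hc : newD.contains h.1 = false
    · have hstep : pvStepOld oldD newD (pvMk3 a m d) h.1 = pvMk3 a m (d.insert h.1 (oldD.getD h.1 0)) := by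
        simp [pvStepOld, hc, pvMk3_modify_deleted]
      rw [hstep, ih a m _ hndt
        (by intro p hp
            rw [PySem.Dict.contains_insert]
            simp [hane p hp, hd p (List.mem_cons_of_mem _ hp)])
        (fun p hp => hv p (List.mem_cons_of_mem _ hp))]
      rw [PySem.Dict.items_insert_of_not_contains _ _ (hd h List.mem_cons_self)]
      rw [hv h List.mem_cons_self]
      simp [hc, List.append_assoc]
    · have hc2 : newD.contains h.1 = true := by revert hc; cases newD.contains h.1 <;> simp
      have hstep : pvStepOld oldD newD (pvMk3 a m d) h.1 = pvMk3 a m d := by simp [pvStepOld, hc2]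
      rw [hstep, ih a m d hndt (fun p hp => hd p (List.mem_cons_of_mem _ hp))
        (fun p hp => hv p (List.mem_cons_of_mem _ hp))]
      simp [hc2]

-- B-side facts about erase (no PySem lemma covers erase; items-level it is a filter by rfl)
theorem pvGet?_erase_of_ne (d : PySem.Dict String Int) (k x : String) (h : x ≠ k) :
    (d.erase k).get? x = d.get? x := by
  obtain ⟨l⟩ := d
  induction l with
  | nil => rfl
  | cons p t ih =>
    have ih' : (PySem.Dict.mk (t.filter (fun q => !(q.1 == k)))).get? x
        = (PySem.Dict.mk t).get? x := ih
    obtain ⟨pk, pv⟩ := p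
    show (PySem.Dict.mk (((pk, pv) :: t).filter (fun q => !(q.1 == k)))).get? x
        = (PySem.Dict.mk ((pk, pv) :: t)).get? x
    by_cases hp : pk = k
    · rw [show (((pk, pv) :: t).filter (fun q => !(q.1 == k)))
          = t.filter (fun q => !(q.1 == k)) by simp [hp]]
      rw [ih', PySem.Dict.get?_mk_cons,
        show (pk == x) = false by simp [hp, Ne.symm h]]
      simp
    · rw [show (((pk, pv) :: t).filter (fun q => !(q.1 == k)))
          = (pk, pv) :: t.filter (fun q => !(q.1 == k)) by simp [hp]]
      rw [PySem.Dict.get?_mk_cons, PySem.Dict.get?_mk_cons, ih']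

theorem pvContains_erase_of_ne (d : PySem.Dict String Int) (k x : String) (h : x ≠ k) :
    (d.erase k).contains x = d.contains x := by
  rw [PySem.Dict.contains_eq_isSome_get?, PySem.Dict.contains_eq_isSome_get?,
    pvGet?_erase_of_ne d k x h]

theorem pvGetD_erase_of_ne (d : PySem.Dict String Int) (k x : String) (v : Int) (h : x ≠ k) :
    (d.erase k).getD x v = d.getD x v := by
  rw [PySem.Dict.getD_eq_get?_getD, PySem.Dict.getD_eq_get?_getD, pvGet?_erase_of_ne d k x h]

theorem pvErase_of_not_contains (d : PySem.Dict String Int) (k : String)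
    (h : d.contains k = false) : d.erase k = d := by
  apply PySem.Dict.ext
  show d.items.filter (fun q => !(q.1 == k)) = d.items
  apply List.filter_eq_self.mpr
  intro p hp
  have : p.1 ∈ d.keys := PySem.Dict.mem_keys_of_mem_items d hp
  rw [PySem.Dict.contains_eq_decide_mem_keys] at h
  simp only [decide_eq_false_iff_not] at h
  simp; intro he; exact h (he ▸ this)

-- B's loop invariant: the pass splits new keys into added/modified against the INITIAL copy,
-- and the copy loses exactly the processed keys
theorem pvFoldB (l : List (String × Int)) :
    ∀ (rem a m : PySem.Dict String Int),
    (l.map Prod.fst).Nodup →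
    (∀ p ∈ l, a.contains p.1 = false) →
    (∀ p ∈ l, m.contains p.1 = false) →
    l.foldl pvStepB (rem, a, m) =
      (l.foldl (fun r (p : String × Int) => r.erase p.1) rem,
       PySem.Dict.mk (a.items ++ l.filter (fun p => !(rem.contains p.1))),
       PySem.Dict.mk (m.items ++ l.filter (fun p => rem.contains p.1 && rem.getD p.1 0 != p.2))) := by
  induction l with
  | nil => intro rem a m _ _ _; simp
  | cons h t ih =>
    intro rem a m hnd ha hm
    simp only [List.map_cons, List.nodup_cons, List.mem_map] at hnd
    obtain ⟨hnh, hndt⟩ := hnd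
    have hane : ∀ p ∈ t, p.1 ≠ h.1 := fun p hp he => hnh ⟨p, hp, he⟩
    have hfilt1 : ∀ (rem' : PySem.Dict String Int), rem' = rem.erase h.1 →
        t.filter (fun p => !(rem'.contains p.1)) = t.filter (fun p => !(rem.contains p.1)) := by
      intro rem' he
      apply List.filter_congr; intro p hp
      rw [he, pvContains_erase_of_ne rem h.1 p.1 (hane p hp)]
    have hfilt2 : ∀ (rem' : PySem.Dict String Int), rem' = rem.erase h.1 →
        t.filter (fun p => rem'.contains p.1 && rem'.getD p.1 0 != p.2) =
        t.filter (fun p => rem.contains p.1 && rem.getD p.1 0 != p.2) := by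
      intro rem' he
      apply List.filter_congr; intro p hp
      rw [he, pvContains_erase_of_ne rem h.1 p.1 (hane p hp),
        pvGetD_erase_of_ne rem h.1 p.1 0 (hane p hp)]
    simp only [List.foldl_cons]
    cases hg : rem.get? h.1 with
    | none =>
      have hc : rem.contains h.1 = false := by
        rw [PySem.Dict.contains_eq_isSome_get?, hg]; rfl
      have hstep : pvStepB (rem, a, m) h = (rem, a.insert h.1 h.2, m) := by
        simp [pvStepB, hg]
      rw [hstep, ih rem (a.insert h.1 h.2) m hndt
        (by intro p hp
            rw [PySem.Dict.contains_insert]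
            simp [hane p hp, ha p (List.mem_cons_of_mem _ hp)])
        (fun p hp => hm p (List.mem_cons_of_mem _ hp))]
      rw [PySem.Dict.items_insert_of_not_contains _ _ (ha h List.mem_cons_self)]
      rw [pvErase_of_not_contains rem h.1 hc]
      simp [hc, List.append_assoc]
    | some old =>
      have hc : rem.contains h.1 = true := by
        rw [PySem.Dict.contains_eq_isSome_get?, hg]; rfl
      have hgd : rem.getD h.1 0 = old := PySem.Dict.getD_of_get?_eq_some _ _ hg
      by_cases hv : old ≠ h.2
      · have hstep : pvStepB (rem, a, m) h = (rem.erase h.1, a, m.insert h.1 h.2) := by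
          simp [pvStepB, hg, hv]
        rw [hstep, ih (rem.erase h.1) a (m.insert h.1 h.2) hndt
          (fun p hp => ha p (List.mem_cons_of_mem _ hp))
          (by intro p hp
              rw [PySem.Dict.contains_insert]
              simp [hane p hp, hm p (List.mem_cons_of_mem _ hp)])]
        rw [PySem.Dict.items_insert_of_not_contains _ _ (hm h List.mem_cons_self)]
        rw [hfilt1 _ rfl, hfilt2 _ rfl]
        simp [hc, hgd, hv, List.append_assoc, bne]
      · have hstep : pvStepB (rem, a, m) h = (rem.erase h.1, a, m) := by
          simp [pvStepB, hg, hv]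
        rw [hstep, ih (rem.erase h.1) a m hndt
          (fun p hp => ha p (List.mem_cons_of_mem _ hp))
          (fun p hp => hm p (List.mem_cons_of_mem _ hp))]
        rw [hfilt1 _ rfl, hfilt2 _ rfl]
        rw [not_ne_iff] at hv
        simp [hc, hgd, hv, bne]

-- erasing every key of l leaves exactly the entries whose key is not a key of l
theorem pvFoldErase (l : List (String × Int)) :
    ∀ (d : PySem.Dict String Int),
    (l.foldl (fun r (p : String × Int) => r.erase p.1) d).items =
      d.items.filter (fun q => !((l.map Prod.fst).contains q.1)) := by
  induction l with
  | nil => intro d; simp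
  | cons h t ih =>
    intro d
    simp only [List.foldl_cons]
    rw [ih (d.erase h.1)]
    show ((d.items.filter (fun q => !(q.1 == h.1))).filter
        (fun q => !((t.map Prod.fst).contains q.1))) = _
    rw [List.filter_filter]
    apply List.filter_congr
    intro p _
    simp only [List.map_cons, List.contains_cons]
    cases hpe : (p.1 == h.1) <;> simp [Bool.and_comm]

-- ===== VERDICT (by name: the statement is the Claim_ definition above) =====
theorem calculate_state_patch_py_spec : Claim_equal_calculate_state_patch_py := by
  intro old_state new_state _ hpre
  obtain ⟨hndo, hndn⟩ := hpre
  -- A reduced to three filters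
  have hA : calculate_state_patch_py old_state new_state =
      [("added", new_state.filter (fun p => !((PySem.Dict.mk old_state).contains p.1))),
       ("modified", new_state.filter (fun p => (PySem.Dict.mk old_state).contains p.1 && (PySem.Dict.mk old_state).getD p.1 0 != p.2)),
       ("deleted", old_state.filter (fun p => !((PySem.Dict.mk new_state).contains p.1)))] := by
    unfold calculate_state_patch_py
    dsimp only
    rw [show (PySem.Dict.ofList [("added", (PySem.Dict.empty : PySem.Dict String Int)), ("modified", PySem.Dict.empty), ("deleted", PySem.Dict.empty)]) = pvMk3 PySem.Dict.empty PySem.Dict.empty PySem.Dict.empty from rfl]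
    rw [pvFoldNew (PySem.Dict.mk old_state) new_state PySem.Dict.empty PySem.Dict.empty PySem.Dict.empty hndn
      (by simp) (by simp)]
    rw [show PySem.Dict.keys (PySem.Dict.mk old_state) = old_state.map Prod.fst from rfl]
    rw [List.foldl_map]
    rw [pvFoldOld (PySem.Dict.mk old_state) (PySem.Dict.mk new_state) old_state _ _ PySem.Dict.empty hndo
      (by simp)
      (by intro p hp
          exact PySem.Dict.getD_of_mem_items _ (show (p.1, p.2) ∈ (PySem.Dict.mk old_state).items from hp) (by simpa [PySem.Dict.keys] using hndo) 0)]
    simp [pvMk3, PySem.Dict.empty]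
  -- B reduced to the same three filters
  have hB : calculate_state_patch_py_alt old_state new_state =
      [("added", new_state.filter (fun p => !((PySem.Dict.mk old_state).contains p.1))),
       ("modified", new_state.filter (fun p => (PySem.Dict.mk old_state).contains p.1 && (PySem.Dict.mk old_state).getD p.1 0 != p.2)),
       ("deleted", old_state.filter (fun p => !((PySem.Dict.mk new_state).contains p.1)))] := by
    unfold calculate_state_patch_py_alt
    dsimp only
    rw [pvFoldB new_state (PySem.Dict.mk old_state) PySem.Dict.empty PySem.Dict.empty hndn
      (by simp) (by simp)]
    rw [pvFoldErase new_state (PySem.Dict.mk old_state)]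
    have hdel : (PySem.Dict.mk old_state).items.filter (fun q => !((new_state.map Prod.fst).contains q.1)) =
        old_state.filter (fun p => !((PySem.Dict.mk new_state).contains p.1)) := by
      show old_state.filter _ = old_state.filter _
      apply List.filter_congr
      intro p _
      rw [PySem.Dict.contains_eq_decide_mem_keys,
        show PySem.Dict.keys (PySem.Dict.mk new_state) = new_state.map Prod.fst from rfl]
      simp
    rw [hdel]
    simp [PySem.Dict.empty]
  rw [Spec_calculate_state_patch_py, hA, hB]
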